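-- pv_equiv track=rewrite | github.com/shackett/shackett.github.io | scripts/utils.py | find_code_block_pairs
-- ===== SOURCE A (Python) =====
-- from typing import Optional, List, Tuple
--
-- def find_code_block_pairs(lines: List[str]) -> List[Tuple[int, int]]:
--     """
--     Find pairs of ``` lines that form code blocks.
--
--     Returns:
--         List of (start_line, end_line) tuples
--     """
--     tick_lines = []
--     for i, line in enumerate(lines):
--         if line.strip().startswith('```'):
--             tick_lines.append(i)
--
--     if len(tick_lines) % 2 != 0:
--         return []  # Can't pair odd number of ticks
--
--     return [(tick_lines[i], tick_lines[i + 1]) for i in range(0, len(tick_lines), 2)]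
-- ===== SOURCE B (Python) =====
-- def find_code_block_pairs(lines):
--     """Single-pass state machine: keep a pending start index and emit a pair
--     whenever a closing delimiter is seen; an unmatched start discards all pairs."""
--     pairs = []
--     start = None
--     for i, line in enumerate(lines):
--         if line.strip().startswith('```'):
--             if start is None:
--                 start = i
--             else:
--                 pairs.append((start, i))
--                 start = None
--     if start is not None:
--         return []
--     return pairs
-- ===== Notes on version B (the rewrite author's own statement) =====
-- stated objective: alternative
-- what changed: Replaces A's collect-all-indices-then-stride pairing (build tick_lines, parity check, comprehension over range(0,len,2) with indexing) by a single-pass state machine that toggles a pending start index and emits pairs on the fly, discarding them only if a start is left unmatched.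
import Mathlib
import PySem

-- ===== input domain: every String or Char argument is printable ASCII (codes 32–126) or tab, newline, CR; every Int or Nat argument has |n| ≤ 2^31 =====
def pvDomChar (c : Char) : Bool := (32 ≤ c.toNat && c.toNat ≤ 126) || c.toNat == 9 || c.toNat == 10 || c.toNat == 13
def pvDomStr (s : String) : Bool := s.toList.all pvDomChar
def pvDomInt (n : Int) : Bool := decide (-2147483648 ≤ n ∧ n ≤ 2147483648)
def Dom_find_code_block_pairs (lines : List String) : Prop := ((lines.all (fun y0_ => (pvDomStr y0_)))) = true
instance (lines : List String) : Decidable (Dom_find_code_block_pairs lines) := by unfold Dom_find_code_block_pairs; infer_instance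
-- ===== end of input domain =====

-- B replaces A's collect-indices-then-stride pairing by a single-pass pending-start state machine (alternative decomposition, same cost).


-- ===== PORT A =====
-- the shared test `line.strip().startswith('```')`
def pvIsTick (line : String) : Bool := PySem.Str.startswith (PySem.Str.strip line) "```"

-- indices in the comprehension are always in range, so pyGetD (default 0) is exact here
def find_code_block_pairs (lines : List String) : List (Int × Int) :=
  let tick_lines : List Int :=
    (PySem.List.enumerate lines).foldl
      (fun acc p => if pvIsTick p.2 then acc ++ [p.1] else acc) []
  if tick_lines.length % 2 ≠ 0 then []
  else
    (PySem.List.pyRange 0 (tick_lines.length : Int) 2).map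
      (fun i => (PySem.List.pyGetD tick_lines i 0, PySem.List.pyGetD tick_lines (i + 1) 0))

-- ===== PORT B =====
def pvGo : List (Int × String) → Option Int → List (Int × Int) → List (Int × Int)
  | [], none, pairs => pairs
  | [], some _, _ => []
  | (i, line) :: rest, start, pairs =>
    if pvIsTick line then
      match start with
      | none => pvGo rest (some i) pairs
      | some s => pvGo rest none (pairs ++ [(s, i)])
    else pvGo rest start pairs

def find_code_block_pairs_alt (lines : List String) : List (Int × Int) :=
  pvGo (PySem.List.enumerate lines) none []

-- ===== PRECONDITION & SPEC =====
def Spec_find_code_block_pairs (lines : List String) (out : List (Int × Int)) : Prop := out = find_code_block_pairs_alt lines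
instance (lines : List String) (out : List (Int × Int)) : Decidable (Spec_find_code_block_pairs lines out) := by unfold Spec_find_code_block_pairs; infer_instance

-- ===== CLAIM (what is proved, stated in full; the proofs are below) =====
def Claim_equal_find_code_block_pairs : Prop := ∀ (lines : List String), Dom_find_code_block_pairs lines → Spec_find_code_block_pairs lines (find_code_block_pairs lines)

-- ===== LEMMAS AND PROOFS =====

-- the tick indices of an enumerated chunk
def pvTicks (l : List (Int × String)) : List Int :=
  (l.filter (fun p => pvIsTick p.2)).map (·.1)

-- pairing consecutive elements (only used on even-length lists)
def pvPairUp : List Int → List (Int × Int)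
  | [] => []
  | [_] => []
  | x :: y :: r => (x, y) :: pvPairUp r

lemma pvGo_spec (l : List (Int × String)) : ∀ (acc : List (Int × Int)),
    (pvGo l none acc = if (pvTicks l).length % 2 = 0 then acc ++ pvPairUp (pvTicks l) else [])
    ∧ ∀ s, pvGo l (some s) acc =
        if (pvTicks l).length % 2 = 1 then acc ++ pvPairUp (s :: pvTicks l) else [] := by
  induction l with
  | nil => intro acc; simp [pvGo, pvTicks, pvPairUp]
  | cons p rest ih =>
    intro acc
    obtain ⟨i, line⟩ := p
    by_cases ht : pvIsTick line
    · have hT : pvTicks ((i, line) :: rest) = i :: pvTicks rest := by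
        simp [pvTicks, ht]
      constructor
      · rw [show pvGo ((i, line) :: rest) none acc = pvGo rest (some i) acc by
          simp [pvGo, ht]]
        rw [(ih acc).2 i, hT]
        rcases Nat.even_or_odd (pvTicks rest).length with h | h
        · simp [Nat.even_iff.mp h, List.length_cons, Nat.succ_mod_two_eq_one_iff.mpr (Nat.even_iff.mp h)]
        · simp [Nat.odd_iff.mp h, List.length_cons, Nat.succ_mod_two_eq_zero_iff.mpr (Nat.odd_iff.mp h)]
      · intro s
        rw [show pvGo ((i, line) :: rest) (some s) acc = pvGo rest none (acc ++ [(s, i)]) by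
          simp [pvGo, ht]]
        rw [(ih (acc ++ [(s, i)])).1, hT]
        rcases Nat.even_or_odd (pvTicks rest).length with h | h
        · simp [Nat.even_iff.mp h, List.length_cons, Nat.succ_mod_two_eq_one_iff.mpr (Nat.even_iff.mp h), pvPairUp]
        · simp [Nat.odd_iff.mp h, List.length_cons, Nat.succ_mod_two_eq_zero_iff.mpr (Nat.odd_iff.mp h)]
    · have hT : pvTicks ((i, line) :: rest) = pvTicks rest := by
        simp [pvTicks, ht]
      have hstep : ∀ st, pvGo ((i, line) :: rest) st acc = pvGo rest st acc := by
        intro st; simp [pvGo, ht]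
      refine ⟨?_, fun s => ?_⟩
      · rw [hstep, (ih acc).1, hT]
      · rw [hstep, (ih acc).2 s, hT]

lemma pvRange2_aux : ∀ (t : List Int), t.length % 2 = 0 →
    (List.range (t.length / 2)).map (fun k => (t.getD (2 * k) 0, t.getD (2 * k + 1) 0)) = pvPairUp t := by
  intro t
  induction t using pvPairUp.induct with
  | case1 => intro _; simp [pvPairUp]
  | case2 x => intro h; simp at h
  | case3 x y r ih =>
    intro h
    have hr : r.length % 2 = 0 := by
      simp only [List.length_cons] at h; omega
    have hlen : (x :: y :: r).length / 2 = r.length / 2 + 1 := by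
      simp [List.length_cons]; omega
    rw [hlen, List.range_succ_eq_map]
    simp only [List.map_cons, List.map_map]
    rw [pvPairUp]
    refine List.cons_eq_cons.mpr ⟨by simp, ?_⟩
    rw [← ih hr]
    apply List.map_congr_left
    intro k _
    have h1 : 2 * (k + 1) = 2 * k + 2 := by omega
    simp [Function.comp, h1]

lemma pvRange2 (t : List Int) (h : t.length % 2 = 0) :
    (PySem.List.pyRange 0 (t.length : Int) 2).map
      (fun i => (PySem.List.pyGetD t i 0, PySem.List.pyGetD t (i + 1) 0)) = pvPairUp t := by
  rw [PySem.List.pyRange_of_pos 0 (t.length : Int) (by norm_num)]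
  have hcount : (if (0 : Int) < (t.length : Int) then (((t.length : Int) - 0 + 2 - 1) / 2).toNat else 0)
      = t.length / 2 := by
    split_ifs with hp
    · have : ((t.length : Int) - 0 + 2 - 1) = (2 * (t.length / 2) : Nat) + 1 := by
        push_cast; omega
      rw [this]
      rw [show ((2 * (t.length / 2) : Nat) : Int) + 1 = (2 * ((t.length / 2 : Nat) : Int)) + 1 by push_cast; ring]
      omega
    · omega
  rw [hcount, List.map_map, ← pvRange2_aux t h]
  apply List.map_congr_left
  intro k _
  have h1 : (0 : Int) + 2 * (k : Int) = ((2 * k : Nat) : Int) := by push_cast; ring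
  have h2 : ((2 * k : Nat) : Int) + 1 = ((2 * k + 1 : Nat) : Int) := by push_cast; ring
  simp only [Function.comp, h1, h2, PySem.List.pyGetD_natCast]

-- ===== VERDICT (by name: the statement is the Claim_ definition above) =====
theorem find_code_block_pairs_spec : Claim_equal_find_code_block_pairs := by
  intro lines _
  unfold Spec_find_code_block_pairs find_code_block_pairs find_code_block_pairs_alt
  rw [PySem.List.foldl_append_if (fun p => pvIsTick p.2) (·.1) (PySem.List.enumerate lines) []]
  simp only [List.nil_append]
  rw [(pvGo_spec (PySem.List.enumerate lines) []).1]
  have hfold : List.map (fun x => x.1) (List.filter (fun p => pvIsTick p.2) (PySem.List.enumerate lines))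
      = pvTicks (PySem.List.enumerate lines) := rfl
  rw [hfold]
  set t := pvTicks (PySem.List.enumerate lines) with hT
  rcases Nat.even_or_odd t.length with h | h
  · have h0 := Nat.even_iff.mp h
    rw [pvRange2 t h0]
    simp [h0]
  · have h1 := Nat.odd_iff.mp h
    simp [h1]
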